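-- pv_equiv track=rewrite | github.com/git-nt/croatian-quiz-scores | wqc/wqc_data.py | medal_counts_for
-- ===== SOURCE A (Python) =====
-- def medal_counts_for(rows: list[tuple[str, int]]) -> tuple[int, int, int]:
--     g = s = b = 0
--     for _name, r in rows:
--         if r == 1:
--             g += 1
--         elif r == 2:
--             s += 1
--         elif r == 3:
--             b += 1
--     return g, s, b
-- ===== SOURCE B (Python) =====
-- def medal_counts_for(rows: list[tuple[str, int]]) -> tuple[int, int, int]:
--     ranks = [r for _name, r in rows]
--     return ranks.count(1), ranks.count(2), ranks.count(3)
-- ===== Notes on version B (the rewrite author's own statement) =====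
-- stated objective: simpler
-- what changed: Replaces the single accumulator pass with if/elif branching by three independent list.count scans over the extracted rank list (staged passes, no per-row branching or mutable counters).
import Mathlib
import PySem

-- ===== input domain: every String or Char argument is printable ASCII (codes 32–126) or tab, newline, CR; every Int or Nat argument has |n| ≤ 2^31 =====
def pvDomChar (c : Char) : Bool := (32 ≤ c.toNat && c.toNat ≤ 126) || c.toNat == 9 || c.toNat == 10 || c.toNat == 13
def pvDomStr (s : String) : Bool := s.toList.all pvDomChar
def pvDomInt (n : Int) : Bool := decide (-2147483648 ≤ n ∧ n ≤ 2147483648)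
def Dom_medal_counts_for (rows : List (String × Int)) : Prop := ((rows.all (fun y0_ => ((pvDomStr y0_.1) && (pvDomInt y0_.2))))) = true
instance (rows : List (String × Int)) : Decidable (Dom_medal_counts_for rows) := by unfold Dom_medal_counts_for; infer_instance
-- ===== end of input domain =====

-- ===== PORT A =====
-- B: three staged list.count scans over the extracted rank list instead of A's branching accumulator pass.
def medal_counts_for (rows : List (String × Int)) : Int × Int × Int :=
  (rows.foldl (fun (acc : Int × Int × Int) row =>
    let (g, s, b) := acc
    let r : Int := row.2
    if r = 1 then (g + 1, s, b)
    else if r = 2 then (g, s + 1, b)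
    else if r = 3 then (g, s, b + 1)
    else (g, s, b)) (0, 0, 0))

-- ===== PORT B =====
def medal_counts_for_alt (rows : List (String × Int)) : Int × Int × Int :=
  let ranks := rows.map Prod.snd
  (PySem.List.count ranks 1, PySem.List.count ranks 2, PySem.List.count ranks 3)

-- ===== PRECONDITION & SPEC =====
def Spec_medal_counts_for (rows : List (String × Int)) (out : Int × Int × Int) : Prop := out = medal_counts_for_alt rows
instance (rows : List (String × Int)) (out : Int × Int × Int) : Decidable (Spec_medal_counts_for rows out) := by unfold Spec_medal_counts_for; infer_instance

-- ===== CLAIM (what is proved, stated in full; the proofs are below) =====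
def Claim_equal_medal_counts_for : Prop := ∀ (rows : List (String × Int)), Dom_medal_counts_for rows → Spec_medal_counts_for rows (medal_counts_for rows)

-- ===== LEMMAS AND PROOFS =====

-- ===== VERDICT (by name: the statement is the Claim_ definition above) =====
theorem medal_fold_eq (rows : List (String × Int)) (g s b : Int) :
    rows.foldl (fun (acc : Int × Int × Int) row =>
      let (g, s, b) := acc
      let r : Int := row.2
      if r = 1 then (g + 1, s, b)
      else if r = 2 then (g, s + 1, b)
      else if r = 3 then (g, s, b + 1)
      else (g, s, b)) (g, s, b)
    = (g + ((rows.map Prod.snd).count 1 : Int),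
       s + ((rows.map Prod.snd).count 2 : Int),
       b + ((rows.map Prod.snd).count 3 : Int)) := by
  induction rows generalizing g s b with
  | nil => simp
  | cons hd tl ih =>
    simp only [List.foldl_cons, List.map_cons, List.count_cons]
    by_cases h1 : hd.2 = 1
    · simp only [h1, ih]; simp; ring_nf
    · by_cases h2 : hd.2 = 2
      · simp only [h2]; norm_num [ih]; omega
      · by_cases h3 : hd.2 = 3
        · simp only [h3]; norm_num [ih, h1, h2]; omega
        · simp only [if_neg h1, if_neg h2, if_neg h3, ih]; simp [h1, h2, h3]

theorem medal_counts_for_spec : Claim_equal_medal_counts_for := by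
  intro rows _
  unfold Spec_medal_counts_for medal_counts_for medal_counts_for_alt
  simp [PySem.List.count_eq, medal_fold_eq]
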